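-- pv_equiv track=rewrite | github.com/KilluaProject/resource_validator | .history/api/index_20260107212726.py | parse_and_separate
-- ===== SOURCE A (Python) =====
-- def parse_and_separate(raw_text):
--     hierarchy_objs = []
--     route_objs = []
--
--     current_obj = {}
--     lines = raw_text.split('\n')
--
--     for line in lines:
--         line = line.strip()
--         if not line or line.startswith('%'):
--             if current_obj:
--                 # 1. INETNUM / INET6NUM (Hierarchy)
--                 if 'inetnum' in current_obj or 'inet6num' in current_obj:
--                     current_obj['_range'] = current_obj.get('inetnum', current_obj.get('inet6num'))
--                     hierarchy_objs.append(current_obj)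
--                 # 2. ROUTE / ROUTE6 (IRR)
--                 elif 'route' in current_obj or 'route6' in current_obj:
--                     origin = current_obj.get('origin', 'UNKNOWN').upper()
--                     source = current_obj.get('source', 'APNIC').upper()
--                     route_objs.append(f"{origin}@{source}")
--                 current_obj = {}
--             continue
--
--         if ':' in line:
--             key, val = line.split(':', 1)
--             key = key.strip().lower()
--             val = val.strip()
--             if key in current_obj:
--                 current_obj[key] += f" | {val}"
--             else:
--                 current_obj[key] = val
--
--     if current_obj:
--         if 'inetnum' in current_obj or 'inet6num' in current_obj:
--             current_obj['_range'] = current_obj.get('inetnum', current_obj.get('inet6num'))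
--             hierarchy_objs.append(current_obj)
--         elif 'route' in current_obj or 'route6' in current_obj:
--             origin = current_obj.get('origin', 'UNKNOWN').upper()
--             source = current_obj.get('source', 'APNIC').upper()
--             route_objs.append(f"{origin}@{source}")
--
--     return hierarchy_objs, list(set(route_objs))
-- ===== SOURCE B (Python) =====
-- def parse_and_separate(raw_text):
--     # Pass 1: segment the stripped lines into blocks (separator = blank line or '%' comment).
--     blocks = []
--     cur = []
--     for line in raw_text.split('\n'):
--         s = line.strip()
--         if not s or s.startswith('%'):
--             if cur:
--                 blocks.append(cur)
--                 cur = []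
--         else:
--             cur.append(s)
--     if cur:
--         blocks.append(cur)
--
--     # Pass 2: build each block's attribute dict and classify it.
--     hierarchy_objs = []
--     route_objs = []
--     for block in blocks:
--         obj = {}
--         for s in block:
--             if ':' in s:
--                 key, val = s.split(':', 1)
--                 key = key.strip().lower()
--                 val = val.strip()
--                 obj[key] = obj[key] + f" | {val}" if key in obj else val
--         if 'inetnum' in obj or 'inet6num' in obj:
--             obj['_range'] = obj.get('inetnum', obj.get('inet6num'))
--             hierarchy_objs.append(obj)
--         elif 'route' in obj or 'route6' in obj:
--             origin = obj.get('origin', 'UNKNOWN').upper()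
--             source = obj.get('source', 'APNIC').upper()
--             route_objs.append(f"{origin}@{source}")
--     return hierarchy_objs, list(set(route_objs))
-- ===== Notes on version B (the rewrite author's own statement) =====
-- stated objective: simpler
-- what changed: A's single pass with a mutable current-object dict and a duplicated flush-and-classify block is replaced by a two-pass decomposition: first segment the stripped lines into blocks, then build each block's dict and classify it in one place.
import Mathlib
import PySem

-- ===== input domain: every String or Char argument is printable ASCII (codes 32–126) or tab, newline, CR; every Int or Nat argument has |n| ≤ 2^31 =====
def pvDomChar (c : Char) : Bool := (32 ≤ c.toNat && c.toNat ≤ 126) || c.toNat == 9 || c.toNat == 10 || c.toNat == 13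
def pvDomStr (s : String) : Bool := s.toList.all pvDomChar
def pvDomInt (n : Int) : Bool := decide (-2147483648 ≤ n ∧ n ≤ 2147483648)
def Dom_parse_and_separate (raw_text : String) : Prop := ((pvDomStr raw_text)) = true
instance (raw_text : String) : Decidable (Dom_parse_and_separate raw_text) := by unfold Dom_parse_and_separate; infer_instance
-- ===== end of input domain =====

-- B replaces A's single pass with mutable dict state by a two-pass decomposition
-- (segment the lines into blocks, then build and classify each block); objective: simpler, same cost.

-- ===== PORT A =====
-- the duplicated classification block of A ("if inetnum … elif route …"), used at a
-- separator line and again after the loop; the inner get('inet6num') (no default, None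
-- when absent) is ported with default "" — exact because the guard ensures the key exists
def pvA_classify (h : List (List (String × String))) (r : List String)
    (d : PySem.Dict String String) : (List (List (String × String))) × List String :=
  if d.contains "inetnum" || d.contains "inet6num" then
    (h ++ [(d.insert "_range" (d.getD "inetnum" (d.getD "inet6num" ""))).items], r)
  else if d.contains "route" || d.contains "route6" then
    (h, r ++ [PySem.Str.join "" [PySem.Str.upper (d.getD "origin" "UNKNOWN"), "@",
                                 PySem.Str.upper (d.getD "source" "APNIC")]])
  else (h, r)

-- one iteration of A's loop; state = (hierarchy_objs, route_objs, current_obj)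
def pvA_step (st : (List (List (String × String))) × List String × PySem.Dict String String)
    (line : String) :
    (List (List (String × String))) × List String × PySem.Dict String String :=
  let l := PySem.Str.strip line
  if l == "" || PySem.Str.startswith l "%" then
    if st.2.2.items.isEmpty then st
    else
      let p := pvA_classify st.1 st.2.1 st.2.2
      (p.1, p.2, PySem.Dict.empty)
  else if PySem.Str.isIn ":" l then
    match PySem.Str.splitMax? l ":" 1 with
    | some [key, val] =>
      let k := PySem.Str.lower (PySem.Str.strip key)
      let v := PySem.Str.strip val
      if st.2.2.contains k then
        (st.1, st.2.1, st.2.2.insert k (PySem.Str.join "" [st.2.2.getD k "", " | ", v]))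
      else
        (st.1, st.2.1, st.2.2.insert k v)
    | _ => st   -- unreachable: split(':', 1) with ':' present yields exactly two parts
  else st

def parse_and_separate (raw_text : String) : (List (List (String × String))) × List String :=
  let lines := (PySem.Str.split? raw_text "\n").getD []
  let st := lines.foldl pvA_step ([], [], PySem.Dict.empty)
  let fin := if st.2.2.items.isEmpty then (st.1, st.2.1) else pvA_classify st.1 st.2.1 st.2.2
  (fin.1, PySem.Set.ofList fin.2)

-- ===== PORT B =====
-- pass 1: segment the stripped lines into blocks; acc = (blocks, cur)
def pvB_seg (acc : List (List String) × List String) (line : String) :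
    List (List String) × List String :=
  let s := PySem.Str.strip line
  if s == "" || PySem.Str.startswith s "%" then
    if acc.2.isEmpty then acc else (acc.1 ++ [acc.2], [])
  else (acc.1, acc.2 ++ [s])

-- pass 2 inner loop: add one (already stripped) line's attribute to the block's dict
def pvB_addAttr (obj : PySem.Dict String String) (s : String) : PySem.Dict String String :=
  if PySem.Str.isIn ":" s then
    match PySem.Str.splitMax? s ":" 1 with
    | some [key, val] =>
      let k := PySem.Str.lower (PySem.Str.strip key)
      let v := PySem.Str.strip val
      if obj.contains k then obj.insert k (PySem.Str.join "" [obj.getD k "", " | ", v])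
      else obj.insert k v
    | _ => obj   -- unreachable: split(':', 1) with ':' present yields exactly two parts
  else obj

def pvB_obj (block : List String) : PySem.Dict String String :=
  block.foldl pvB_addAttr PySem.Dict.empty

-- pass 2 outer loop: build the block's dict and classify it
def pvB_class (acc : (List (List (String × String))) × List String) (block : List String) :
    (List (List (String × String))) × List String :=
  let obj := pvB_obj block
  if obj.contains "inetnum" || obj.contains "inet6num" then
    (acc.1 ++ [(obj.insert "_range" (obj.getD "inetnum" (obj.getD "inet6num" ""))).items], acc.2)
  else if obj.contains "route" || obj.contains "route6" then
    (acc.1, acc.2 ++ [PySem.Str.join "" [PySem.Str.upper (obj.getD "origin" "UNKNOWN"), "@",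
                                         PySem.Str.upper (obj.getD "source" "APNIC")]])
  else acc

def parse_and_separate_alt (raw_text : String) : (List (List (String × String))) × List String :=
  let seg := ((PySem.Str.split? raw_text "\n").getD []).foldl pvB_seg ([], [])
  let blocks := if seg.2.isEmpty then seg.1 else seg.1 ++ [seg.2]
  let res := blocks.foldl pvB_class ([], [])
  (res.1, PySem.Set.ofList res.2)

-- ===== PRECONDITION & SPEC =====
def Spec_parse_and_separate (raw_text : String) (out : (List (List (String × String))) × List String) : Prop := out = parse_and_separate_alt raw_text
instance (raw_text : String) (out : (List (List (String × String))) × List String) : Decidable (Spec_parse_and_separate raw_text out) := by unfold Spec_parse_and_separate; infer_instance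

-- ===== CLAIM (what is proved, stated in full; the proofs are below) =====
def Claim_equal_parse_and_separate : Prop := ∀ (raw_text : String), Dom_parse_and_separate raw_text → Spec_parse_and_separate raw_text (parse_and_separate raw_text)

-- ===== LEMMAS AND PROOFS =====

-- A's finishing step (flush the pending object), B's finishing step (close the pending
-- block and fold the classifier over the blocks), and the state correspondence
def pvFinA (st : (List (List (String × String))) × List String × PySem.Dict String String) :
    (List (List (String × String))) × List String :=
  if st.2.2.items.isEmpty then (st.1, st.2.1) else pvA_classify st.1 st.2.1 st.2.2

def pvFinB (seg : List (List String) × List String) :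
    (List (List (String × String))) × List String :=
  (if seg.2.isEmpty then seg.1 else seg.1 ++ [seg.2]).foldl pvB_class ([], [])

def pvStOf (blocks : List (List String)) (cur : List String) :
    (List (List (String × String))) × List String × PySem.Dict String String :=
  ((blocks.foldl pvB_class ([], [])).1, (blocks.foldl pvB_class ([], [])).2, pvB_obj cur)

theorem pvB_class_eq (acc : (List (List (String × String))) × List String)
    (block : List String) : pvB_class acc block = pvA_classify acc.1 acc.2 (pvB_obj block) := rfl

theorem pvB_obj_append (cur : List String) (s : String) :
    pvB_obj (cur ++ [s]) = pvB_addAttr (pvB_obj cur) s := by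
  unfold pvB_obj
  rw [List.foldl_concat]

theorem pvB_obj_items_nil (cur : List String) (hnil : (pvB_obj cur).items = []) :
    pvB_obj cur = PySem.Dict.mk [] := by
  cases hd : pvB_obj cur with
  | mk items => rw [hd] at hnil; simp only at hnil; rw [hnil]

theorem pvB_class_nilobj (acc : (List (List (String × String))) × List String)
    (cur : List String) (hnil : (pvB_obj cur).items = []) :
    pvB_class acc cur = acc := by
  unfold pvB_class
  rw [pvB_obj_items_nil cur hnil]
  simp [PySem.Dict.contains]

theorem pvA_step_sep (st : (List (List (String × String))) × List String × PySem.Dict String String)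
    (line : String)
    (hsep : (PySem.Str.strip line == "" || PySem.Str.startswith (PySem.Str.strip line) "%") = true) :
    pvA_step st line =
      if st.2.2.items.isEmpty then st
      else ((pvA_classify st.1 st.2.1 st.2.2).1, (pvA_classify st.1 st.2.1 st.2.2).2,
            PySem.Dict.empty) := by
  simp only [pvA_step, hsep, if_true]

theorem pvA_step_content (st : (List (List (String × String))) × List String × PySem.Dict String String)
    (line : String)
    (hsep : (PySem.Str.strip line == "" || PySem.Str.startswith (PySem.Str.strip line) "%") = false) :
    pvA_step st line = (st.1, st.2.1, pvB_addAttr st.2.2 (PySem.Str.strip line)) := by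
  revert hsep
  unfold pvA_step pvB_addAttr
  generalize PySem.Str.strip line = l
  intro hsep
  simp only [hsep, Bool.false_eq_true, if_false]
  by_cases hin : PySem.Str.isIn ":" l = true
  · simp only [hin, if_true]
    generalize PySem.Str.splitMax? l ":" 1 = o
    rcases o with _ | (_ | ⟨key, _ | ⟨val, _ | ⟨x, xs⟩⟩⟩)
    · rfl
    · rfl
    · rfl
    · by_cases hk : st.2.2.contains (PySem.Str.lower (PySem.Str.strip key)) = true
      · simp only
        rw [if_pos hk, if_pos hk]
      · simp only
        rw [if_neg hk, if_neg hk]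
    · rfl
  · have hin' : PySem.Str.isIn ":" l = false := by simpa using hin
    simp only [hin', Bool.false_eq_true, if_false]

theorem pvB_seg_sep (acc : List (List String) × List String) (line : String)
    (hsep : (PySem.Str.strip line == "" || PySem.Str.startswith (PySem.Str.strip line) "%") = true) :
    pvB_seg acc line = if acc.2.isEmpty then acc else (acc.1 ++ [acc.2], []) := by
  simp only [pvB_seg, hsep, if_true]

theorem pvB_seg_content (acc : List (List String) × List String) (line : String)
    (hsep : (PySem.Str.strip line == "" || PySem.Str.startswith (PySem.Str.strip line) "%") = false) :
    pvB_seg acc line = (acc.1, acc.2 ++ [PySem.Str.strip line]) := by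
  simp only [pvB_seg, hsep, Bool.false_eq_true, if_false]

-- when the pending block's dict is empty, appending it as a closed block changes nothing
theorem pvStOf_shift (blocks : List (List String)) (cur : List String)
    (hnil : (pvB_obj cur).items = []) :
    pvStOf blocks cur = pvStOf (blocks ++ [cur]) [] := by
  unfold pvStOf
  rw [List.foldl_append]
  simp only [List.foldl_cons, List.foldl_nil]
  rw [pvB_class_nilobj _ cur hnil, pvB_obj_items_nil cur hnil]
  rfl

-- flushing a nonempty pending object = classifying the closed block
theorem pvFlush_shift (blocks : List (List String)) (cur : List String) :
    ((pvA_classify (pvStOf blocks cur).1 (pvStOf blocks cur).2.1 (pvStOf blocks cur).2.2).1,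
     (pvA_classify (pvStOf blocks cur).1 (pvStOf blocks cur).2.1 (pvStOf blocks cur).2.2).2,
     PySem.Dict.empty) = pvStOf (blocks ++ [cur]) [] := by
  unfold pvStOf
  rw [List.foldl_append]
  simp only [List.foldl_cons, List.foldl_nil]
  rw [pvB_class_eq]
  rfl

-- the invariant: running A's loop from the state corresponding to B's segmentation
-- accumulator, then finishing, gives exactly B's classification of the final blocks
theorem pvMain : ∀ (lines : List String) (blocks : List (List String)) (cur : List String),
    pvFinA (lines.foldl pvA_step (pvStOf blocks cur)) = pvFinB (lines.foldl pvB_seg (blocks, cur)) := by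
  intro lines
  induction lines with
  | nil =>
    intro blocks cur
    simp only [List.foldl_nil]
    by_cases hnil : (pvB_obj cur).items = []
    · by_cases hc : cur = []
      · subst hc
        rfl
      · unfold pvFinA pvFinB
        rw [if_pos (by simp [pvStOf, hnil]), if_neg (by simp [List.isEmpty_iff, hc]),
          List.foldl_append]
        simp only [List.foldl_cons, List.foldl_nil]
        rw [pvB_class_nilobj _ cur hnil]
        rfl
    · have hcur : cur ≠ [] := fun hcc => hnil (by rw [hcc]; rfl)
      unfold pvFinA pvFinB
      rw [if_neg (by simp [pvStOf, List.isEmpty_iff, hnil]),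
        if_neg (by simp [List.isEmpty_iff, hcur]), List.foldl_append]
      simp only [List.foldl_cons, List.foldl_nil]
      rw [pvB_class_eq]
      rfl
  | cons line rest ih =>
    intro blocks cur
    simp only [List.foldl_cons]
    by_cases hsep : (PySem.Str.strip line == "" || PySem.Str.startswith (PySem.Str.strip line) "%") = true
    · rw [pvA_step_sep _ _ hsep, pvB_seg_sep _ _ hsep]
      by_cases hnil : (pvB_obj cur).items = []
      · rw [if_pos (by simp [pvStOf, hnil])]
        by_cases hc : cur = []
        · subst hc
          rw [if_pos (by simp)]
          exact ih blocks []
        · rw [if_neg (by simp [List.isEmpty_iff, hc]), pvStOf_shift blocks cur hnil]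
          exact ih _ _
      · have hcur : cur ≠ [] := fun hcc => hnil (by rw [hcc]; rfl)
        rw [if_neg (by simp [pvStOf, List.isEmpty_iff, hnil]),
          if_neg (by simp [List.isEmpty_iff, hcur]), pvFlush_shift blocks cur]
        exact ih _ _
    · have hsep' : (PySem.Str.strip line == "" || PySem.Str.startswith (PySem.Str.strip line) "%") = false := by
        simpa using hsep
      rw [pvA_step_content _ _ hsep', pvB_seg_content _ _ hsep']
      have h2 : ((pvStOf blocks cur).1, (pvStOf blocks cur).2.1,
          pvB_addAttr (pvStOf blocks cur).2.2 (PySem.Str.strip line)) =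
          pvStOf blocks (cur ++ [PySem.Str.strip line]) := by
        simp only [pvStOf, pvB_obj_append]
      rw [h2]
      exact ih _ _

-- ===== VERDICT (by name: the statement is the Claim_ definition above) =====
theorem parse_and_separate_spec : Claim_equal_parse_and_separate := by
  intro raw_text _
  unfold Spec_parse_and_separate
  have h := pvMain ((PySem.Str.split? raw_text "\n").getD []) [] []
  simp only [pvFinA, pvFinB, pvStOf, pvB_obj, List.foldl_nil] at h
  simp only [parse_and_separate, parse_and_separate_alt]
  rw [h]
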